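-- pv_equiv track=rewrite | github.com/automationexperts/ats | ats-code/ControllerFormat2Int.py | ControllerFormat2Int
-- ===== SOURCE A (Python) =====
-- def ControllerFormat2Int(data):
--     #Converts the data part of input from controller to properly formatted
--     #integer, takes care of 2's complement notation also
--     Length = len(data)
--     num = 0
--     for i in range(Length-2,1,-1):
--         placeMover = 2 ** ((Length-2-i) * 7) #multiplier to put integer in proper place
--         num = num +int(bin(data[i])[3:],2) * placeMover
--     # previous for loop formats integer num approprately from incoming data need to still apply 2's complement
--     if ((Length-3) == 1) and (num > 63):
--         num = num - 128
--     if ((Length-3) == 2) and (num > 8191):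
--         num = num - 16384
--     if ((Length-3) == 3) and (num > 1048575):
--         num = num - 2097152
--     if ((Length-3) == 4) and (num > 134217727):
--         num = num - 268435456
--     return num
-- ===== SOURCE B (Python) =====
-- def ControllerFormat2Int(data):
--     # Horner accumulation over the payload slice + one guarded closed-form
--     # two's-complement correction instead of reversed powers and a four-way if-chain.
--     num = 0
--     for b in data[2:-1]:
--         num = num * 128 + int(bin(b)[3:], 2)
--     n = len(data) - 3
--     if 1 <= n <= 4 and num >= 2 ** (7 * n - 1):
--         num -= 2 ** (7 * n)
--     return num
-- ===== Notes on version B (the rewrite author's own statement) =====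
-- stated objective: simpler
-- what changed: B replaces the reversed index loop with explicit place-value powers and the four-way two's-complement if-chain by a forward Horner accumulation over the payload slice and one guarded closed-form correction num -= 2**(7n) when 1<=n<=4 and num >= 2**(7n-1).
import Mathlib
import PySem

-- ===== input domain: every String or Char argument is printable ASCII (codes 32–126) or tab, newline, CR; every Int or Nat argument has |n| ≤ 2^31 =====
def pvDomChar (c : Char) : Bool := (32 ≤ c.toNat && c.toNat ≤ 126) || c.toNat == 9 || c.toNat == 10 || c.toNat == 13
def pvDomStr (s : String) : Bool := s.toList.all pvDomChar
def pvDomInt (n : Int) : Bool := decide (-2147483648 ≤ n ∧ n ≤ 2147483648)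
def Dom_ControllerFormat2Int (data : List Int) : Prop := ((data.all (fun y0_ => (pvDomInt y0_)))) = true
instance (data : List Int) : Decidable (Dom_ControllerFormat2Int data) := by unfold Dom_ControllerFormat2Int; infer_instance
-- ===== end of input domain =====

-- B is a simpler decomposition of A: forward Horner accumulation over the payload
-- slice plus one guarded closed-form two's-complement correction, instead of a
-- reversed index loop with explicit powers and a four-way if-chain.

-- ===== PORT A =====
-- shared digit helper: int(bin(b)[3:], 2), exactly Python's bin string with the
-- first three characters dropped, parsed in base 2; returns 0 where Python raises
-- ValueError on the empty string (b = 0 or b = 1, excluded by Pre_).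
def pyIntBinDrop3 (b : Int) : Int :=
  let s : List Char := (if b < 0 then ['-', '0', 'b'] else ['0', 'b']) ++ Nat.toDigits 2 b.natAbs
  (s.drop 3).foldl (fun acc c => acc * 2 + (if c = '1' then 1 else 0)) 0

def ControllerFormat2Int (data : List Int) : Int :=
  let Length : Int := data.length
  let num : Int := (PySem.List.pyRange (Length - 2) 1 (-1)).foldl
    (fun num i =>
      let placeMover : Int := 2 ^ (((Length - 2 - i) * 7).toNat)
      num + pyIntBinDrop3 (PySem.List.pyGetD data i 0) * placeMover) 0
  let num := if Length - 3 = 1 ∧ num > 63 then num - 128 else num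
  let num := if Length - 3 = 2 ∧ num > 8191 then num - 16384 else num
  let num := if Length - 3 = 3 ∧ num > 1048575 then num - 2097152 else num
  let num := if Length - 3 = 4 ∧ num > 134217727 then num - 268435456 else num
  num

-- ===== PORT B =====
def ControllerFormat2Int_alt (data : List Int) : Int :=
  let num : Int := (PySem.List.slice data (some 2) (some (-1))).foldl
    (fun num b => num * 128 + pyIntBinDrop3 b) 0
  let n : Int := data.length - 3
  if 1 ≤ n ∧ n ≤ 4 ∧ num ≥ 2 ^ ((7 * n - 1).toNat) then num - 2 ^ ((7 * n).toNat) else num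

-- ===== PRECONDITION & SPEC =====
-- Pre_ excludes exactly the inputs where Python A (and B) raises ValueError:
-- a payload byte equal to 0 or 1 makes bin(b)[3:] the empty string.
def Pre_ControllerFormat2Int (data : List Int) : Prop :=
  ∀ b ∈ (data.drop 2).dropLast, b ≠ 0 ∧ b ≠ 1

instance (data : List Int) : Decidable (Pre_ControllerFormat2Int data) := by
  unfold Pre_ControllerFormat2Int; infer_instance

def pvWitness_ControllerFormat2Int : List Int := [10, 6, 200, 70, 3]

def Spec_ControllerFormat2Int (data : List Int) (out : Int) : Prop := out = ControllerFormat2Int_alt data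
instance (data : List Int) (out : Int) : Decidable (Spec_ControllerFormat2Int data out) := by unfold Spec_ControllerFormat2Int; infer_instance

-- ===== CLAIM (what is proved, stated in full; the proofs are below) =====
def Claim_equal_ControllerFormat2Int : Prop := ∀ (data : List Int), Dom_ControllerFormat2Int data → Pre_ControllerFormat2Int data → Spec_ControllerFormat2Int data (ControllerFormat2Int data)

-- ===== LEMMAS AND PROOFS =====

-- B's loop value, abstracted
def hornerDig (l : List Int) : Int := l.foldl (fun a b => a * 128 + pyIntBinDrop3 b) 0

lemma hornerDig_append (l : List Int) (b : Int) :
    hornerDig (l ++ [b]) = hornerDig l * 128 + pyIntBinDrop3 b := by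
  simp [hornerDig, List.foldl_append]

-- the sum-of-place-values form of A's loop equals Horner
lemma sum_places_eq_horner (l : List Int) :
    (((List.range l.length).map
        (fun k => pyIntBinDrop3 (l.getD k 0) * (128 : Int) ^ (l.length - 1 - k))).sum)
      = hornerDig l := by
  induction l using List.reverseRecOn with
  | nil => simp [hornerDig]
  | append_singleton t b ih =>
      rw [hornerDig_append, ← ih]
      rw [List.length_append, List.length_singleton, List.range_succ]
      rw [List.map_append, List.sum_append]
      simp only [List.map_cons, List.map_nil, List.sum_cons, List.sum_nil]
      have hlast : (t ++ [b]).getD t.length 0 = b := by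
        simp [List.getD]
      rw [hlast]
      have hmap : (List.range t.length).map
            (fun k => pyIntBinDrop3 ((t ++ [b]).getD k 0) * (128 : Int) ^ (t.length + 1 - 1 - k))
          = (List.range t.length).map
            (fun k => (pyIntBinDrop3 (t.getD k 0) * (128 : Int) ^ (t.length - 1 - k)) * 128) := by
        apply List.map_congr_left
        intro k hk
        rw [List.mem_range] at hk
        have hget : (t ++ [b]).getD k 0 = t.getD k 0 := by
          simp [List.getD, List.getElem?_append_left hk]
        rw [hget, mul_assoc, ← pow_succ]
        congr 2
        omega
      rw [hmap, List.sum_map_mul_right]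
      simp

lemma slice_payload (xs : List Int) :
    PySem.List.slice xs (some 2) (some (-1)) = (xs.drop 2).dropLast := by
  simp [PySem.List.slice, PySem.List.clampIdx]
  split_ifs with h
  · simp [h]
  · have hlen : 1 ≤ xs.length := List.length_pos_iff.mpr h
    have ht : ((xs.length : Int) + -1).toNat = xs.length - 1 := by omega
    rw [ht, List.dropLast_eq_take, List.length_drop]
    by_cases h2 : xs.length ≤ 2
    · have hmin : min 2 xs.length = xs.length := by omega
      rw [hmin]
      simp
      omega
    · have hmin : min 2 xs.length = 2 := by omega
      rw [hmin]
      congr 1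

lemma loopA_eq (xs : List Int) :
    (PySem.List.pyRange ((xs.length : Int) - 2) 1 (-1)).foldl
      (fun num i =>
        let placeMover : Int := 2 ^ ((((xs.length : Int) - 2 - i) * 7).toNat)
        num + pyIntBinDrop3 (PySem.List.pyGetD xs i 0) * placeMover) 0
    = hornerDig ((xs.drop 2).dropLast) := by
  have hl : ((xs.drop 2).dropLast).length = xs.length - 3 := by
    simp [List.length_dropLast, List.length_drop]
    omega
  rw [PySem.List.pyRange_neg_one_eq_reverse]
  have h2 : ((1:Int) + 1) = 2 := by decide
  have h3 : ((xs.length:Int) - 2 + 1) = (xs.length:Int) - 1 := by ring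
  rw [h2, h3]
  show (PySem.List.pyRange 2 ((xs.length:Int) - 1) 1).reverse.foldl
      (fun num i => num + pyIntBinDrop3 (PySem.List.pyGetD xs i 0) *
        2 ^ ((((xs.length : Int) - 2 - i) * 7).toNat)) 0 = _
  rw [PySem.List.foldl_add]
  rw [List.map_reverse, List.sum_reverse, zero_add]
  rw [PySem.List.pyRange_one]
  have hn : (((xs.length:Int) - 1) - 2).toNat = xs.length - 3 := by omega
  rw [hn, List.map_map, ← sum_places_eq_horner ((xs.drop 2).dropLast), hl]
  congr 1
  apply List.map_congr_left
  intro k hk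
  rw [List.mem_range] at hk
  have hm4 : 4 ≤ xs.length := by omega
  simp only [Function.comp_apply]
  have hidx : (2 : Int) + (k : Int) = ((2 + k : Nat) : Int) := by push_cast; ring
  rw [hidx, PySem.List.pyGetD_natCast]
  have hklt : k < ((xs.drop 2).dropLast).length := by omega
  have hget : xs.getD (2 + k) 0 = ((xs.drop 2).dropLast).getD k 0 := by
    have h1 : k < (xs.drop 2).length - 1 := by
      simp [List.length_drop]; omega
    have h2' : 2 + k < xs.length := by omega
    rw [List.getD_eq_getElem _ _ (by omega : 2 + k < xs.length),
        List.getD_eq_getElem _ _ hklt]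
    rw [List.getElem_dropLast, List.getElem_drop]
  rw [hget]
  have hexp : ((((xs.length:Int) - 2 - (((2 + k : Nat) : Int)))) * 7).toNat
      = 7 * ((xs.length - 3) - 1 - k) := by
    push_cast
    omega
  rw [hexp, pow_mul]
  norm_num

-- the four-way if-chain equals the single guarded closed form
lemma chain_eq (n N : Int) :
    (let a := if n = 1 ∧ N > 63 then N - 128 else N
     let b := if n = 2 ∧ a > 8191 then a - 16384 else a
     let c := if n = 3 ∧ b > 1048575 then b - 2097152 else b
     if n = 4 ∧ c > 134217727 then c - 268435456 else c)
    = if 1 ≤ n ∧ n ≤ 4 ∧ N ≥ 2 ^ ((7 * n - 1).toNat) then N - 2 ^ ((7 * n).toNat) else N := by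
  by_cases h1 : n = 1
  · subst h1
    have e1 : ((7 * (1:Int) - 1).toNat) = 6 := by decide
    have e2 : ((7 * (1:Int)).toNat) = 7 := by decide
    simp only [e1, e2]
    norm_num
    split_ifs <;> omega
  · by_cases h2 : n = 2
    · subst h2
      have e1 : ((7 * (2:Int) - 1).toNat) = 13 := by decide
      have e2 : ((7 * (2:Int)).toNat) = 14 := by decide
      simp only [e1, e2]
      norm_num
      split_ifs <;> omega
    · by_cases h3 : n = 3
      · subst h3
        have e1 : ((7 * (3:Int) - 1).toNat) = 20 := by decide
        have e2 : ((7 * (3:Int)).toNat) = 21 := by decide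
        simp only [e1, e2]
        norm_num
        split_ifs <;> omega
      · by_cases h4 : n = 4
        · subst h4
          have e1 : ((7 * (4:Int) - 1).toNat) = 27 := by decide
          have e2 : ((7 * (4:Int)).toNat) = 28 := by decide
          simp only [e1, e2]
          norm_num
          split_ifs <;> omega
        · have c1 : ¬(n = 1 ∧ N > 63) := fun h => h1 h.1
          have c2 : ¬(n = 2 ∧ N > 8191) := fun h => h2 h.1
          have c3 : ¬(n = 3 ∧ N > 1048575) := fun h => h3 h.1
          have c4 : ¬(n = 4 ∧ N > 134217727) := fun h => h4 h.1
          have c5 : ¬(1 ≤ n ∧ n ≤ 4 ∧ N ≥ 2 ^ ((7 * n - 1).toNat)) := by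
            rintro ⟨ha, hb, -⟩; omega
          simp only [if_neg c1, if_neg c2, if_neg c3, if_neg c4, if_neg c5]

-- ===== VERDICT (by name: the statement is the Claim_ definition above) =====
theorem ControllerFormat2Int_spec : Claim_equal_ControllerFormat2Int := by
  intro data _ _
  show ControllerFormat2Int data = ControllerFormat2Int_alt data
  have hA : ControllerFormat2Int data =
      (let N := hornerDig ((data.drop 2).dropLast)
       let a := if (data.length : Int) - 3 = 1 ∧ N > 63 then N - 128 else N
       let b := if (data.length : Int) - 3 = 2 ∧ a > 8191 then a - 16384 else a
       let c := if (data.length : Int) - 3 = 3 ∧ b > 1048575 then b - 2097152 else b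
       if (data.length : Int) - 3 = 4 ∧ c > 134217727 then c - 268435456 else c) := by
    show (let num := (PySem.List.pyRange ((data.length : Int) - 2) 1 (-1)).foldl
            (fun num i =>
              let placeMover : Int := 2 ^ ((((data.length : Int) - 2 - i) * 7).toNat)
              num + pyIntBinDrop3 (PySem.List.pyGetD data i 0) * placeMover) 0
          let num := if (data.length : Int) - 3 = 1 ∧ num > 63 then num - 128 else num
          let num := if (data.length : Int) - 3 = 2 ∧ num > 8191 then num - 16384 else num
          let num := if (data.length : Int) - 3 = 3 ∧ num > 1048575 then num - 2097152 else num
          if (data.length : Int) - 3 = 4 ∧ num > 134217727 then num - 268435456 else num) = _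
    rw [loopA_eq data]
  have hB : ControllerFormat2Int_alt data =
      (let N := hornerDig ((data.drop 2).dropLast)
       if 1 ≤ (data.length : Int) - 3 ∧ (data.length : Int) - 3 ≤ 4 ∧
           N ≥ 2 ^ ((7 * ((data.length : Int) - 3) - 1).toNat)
       then N - 2 ^ ((7 * ((data.length : Int) - 3)).toNat) else N) := by
    show (let num := (PySem.List.slice data (some 2) (some (-1))).foldl
            (fun num b => num * 128 + pyIntBinDrop3 b) 0
          let n : Int := (data.length : Int) - 3
          if 1 ≤ n ∧ n ≤ 4 ∧ num ≥ 2 ^ ((7 * n - 1).toNat)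
          then num - 2 ^ ((7 * n).toNat) else num) = _
    rw [slice_payload data]
    rfl
  rw [hA, hB]
  exact chain_eq ((data.length : Int) - 3) (hornerDig ((data.drop 2).dropLast))
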